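-- pv_equiv track=rewrite | github.com/petersm3/roae | solve.py | debruijn_to_hexagram_permutation
-- ===== SOURCE A (Python) =====
-- def debruijn_to_hexagram_permutation(binary_seq, n=6):
--     """Read the cyclic binary sequence as overlapping length-n windows,
--     each packed into an n-bit value (bit 0 = first bit of window).
--     For n=6 this gives a permutation of {0..63}."""
--     N = len(binary_seq)
--     perm = []
--     for i in range(N):
--         w = 0
--         for j in range(n):
--             w |= binary_seq[(i + j) % N] << j
--         perm.append(w)
--     return perm
-- ===== SOURCE B (Python) =====
-- def debruijn_to_hexagram_permutation(binary_seq, n=6):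
--     """Binary-doubling ("sparse table") construction: a table P holds every
--     packed window of length L for L = 1, 2, 4, ...; a length-2L window is two
--     length-L windows OR-combined, and the length-n answer is assembled from
--     the windows for the set bits of n.  O(N log n) word ops instead of A's
--     O(N*n)."""
--     N = len(binary_seq)
--     out = [0] * N
--     if N == 0 or n <= 0:
--         return out
--     P = list(binary_seq)   # packed windows of length L = 1
--     L = 1
--     off = 0                # out[i] currently packs the window of length off at i
--     m = n
--     while True:
--         if m & 1:
--             out = [out[i] | (P[(i + off) % N] << off) for i in range(N)]
--             off += L
--         m >>= 1
--         if not m: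
--             return out
--         P = [P[i] | (P[(i + L) % N] << L) for i in range(N)]
--         L <<= 1
-- ===== Notes on version B (the rewrite author's own statement) =====
-- stated objective: faster
-- what changed: B replaces A's per-window inner loop (n OR-shift steps for each of the N outputs) by a binary-doubling sparse table: packed windows of length 1,2,4,... are built by OR-combining two half windows, and each output assembles the windows for the set bits of n, giving O(N log n) word operations instead of O(N*n).
import Mathlib
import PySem

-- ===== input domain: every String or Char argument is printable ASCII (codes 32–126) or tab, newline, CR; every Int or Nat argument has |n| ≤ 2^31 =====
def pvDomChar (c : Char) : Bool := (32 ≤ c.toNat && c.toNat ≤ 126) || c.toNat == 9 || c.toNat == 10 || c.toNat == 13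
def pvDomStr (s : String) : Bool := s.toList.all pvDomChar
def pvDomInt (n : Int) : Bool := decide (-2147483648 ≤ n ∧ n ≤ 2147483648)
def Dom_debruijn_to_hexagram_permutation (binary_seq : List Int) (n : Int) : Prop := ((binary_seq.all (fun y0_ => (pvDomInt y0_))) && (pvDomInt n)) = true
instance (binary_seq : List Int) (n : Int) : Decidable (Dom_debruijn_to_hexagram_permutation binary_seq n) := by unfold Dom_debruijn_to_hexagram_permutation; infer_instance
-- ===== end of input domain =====

-- B builds the windows by binary doubling (a sparse table of packed windows of length
-- 1, 2, 4, …, OR-combined along the set bits of n) instead of A's per-window inner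
-- loop; same return value on every input.

-- ===== PORT A =====
-- Literal port of A. Inside the inner loop N > 0 and (i+j) % N ∈ [0, N), so pyGetD's
-- default is never used; j comes from range(n) so j ≥ 0 and '<<< j.toNat' is Python's '<< j'.
def debruijn_to_hexagram_permutation (binary_seq : List Int) (n : Int) : List Int :=
  let N : Int := (binary_seq.length : Int)
  (PySem.List.pyRange 0 N).foldl
    (fun perm i =>
      perm ++ [(PySem.List.pyRange 0 n).foldl
        (fun w j =>
          PySem.Int.bor w
            ((PySem.List.pyGetD binary_seq (PySem.Int.mod (i + j) N) 0) <<< j.toNat))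
        0])
    []

-- ===== PORT B =====
-- Literal port of Source B's while-loop.  m is Python's m, a positive int, carried as a
-- Nat: 'm & 1' is m % 2 and 'm >>= 1' is m / 2 (exact for m ≥ 0); L and off are
-- nonnegative ints, so '<< off' / '<< L' are '<<< off.toNat' / '<<< L.toNat'; list
-- indices produced by '% N' are in [0, N), so pyGetD's default is never used.
def pvBLoop (N : Int) (m : Nat) (P : List Int) (L : Int) (out : List Int) (off : Int) : List Int :=
  let out' := if m % 2 = 1 then
      (PySem.List.pyRange 0 N).map (fun i =>
        PySem.Int.bor (PySem.List.pyGetD out i 0)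
          ((PySem.List.pyGetD P (PySem.Int.mod (i + off) N) 0) <<< off.toNat))
    else out
  let off' := if m % 2 = 1 then off + L else off
  if m / 2 = 0 then out'
  else pvBLoop N (m / 2)
      ((PySem.List.pyRange 0 N).map (fun i =>
        PySem.Int.bor (PySem.List.pyGetD P i 0)
          ((PySem.List.pyGetD P (PySem.Int.mod (i + L) N) 0) <<< L.toNat)))
      (L * 2) out' off'
termination_by m
decreasing_by omega

def debruijn_to_hexagram_permutation_alt (binary_seq : List Int) (n : Int) : List Int :=
  let N : Int := (binary_seq.length : Int)
  let out : List Int := List.replicate binary_seq.length 0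
  if N = 0 ∨ n ≤ 0 then out
  else pvBLoop N n.toNat binary_seq 1 out 0

-- ===== PRECONDITION & SPEC =====
def Spec_debruijn_to_hexagram_permutation (binary_seq : List Int) (n : Int) (out : List Int) : Prop := out = debruijn_to_hexagram_permutation_alt binary_seq n
instance (binary_seq : List Int) (n : Int) (out : List Int) : Decidable (Spec_debruijn_to_hexagram_permutation binary_seq n out) := by unfold Spec_debruijn_to_hexagram_permutation; infer_instance

-- ===== CLAIM (what is proved, stated in full; the proofs are below) =====
def Claim_equal_debruijn_to_hexagram_permutation : Prop := ∀ (binary_seq : List Int) (n : Int), Dom_debruijn_to_hexagram_permutation binary_seq n → Spec_debruijn_to_hexagram_permutation binary_seq n (debruijn_to_hexagram_permutation binary_seq n)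

-- ===== LEMMAS AND PROOFS =====

-- ---- bit-level toolkit for PySem.Int.bor and <<< ----

theorem int_shiftL_eq (a : Int) (k : Nat) : a <<< k = a * 2 ^ k := by
  cases a with
  | ofNat m =>
      show (Int.ofNat (m <<< k)) = _
      rw [Nat.shiftLeft_eq]
      simp [Int.ofNat_eq_natCast]
  | negSucc m =>
      show (Int.negSucc ((m + 1) <<< k - 1)) = _
      rw [Nat.shiftLeft_eq, Int.negSucc_eq, Int.negSucc_eq]
      have h1 : 1 ≤ (m + 1) * 2 ^ k := Nat.one_le_iff_ne_zero.mpr (by positivity)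
      push_cast [h1]
      ring

theorem int_shiftL_zero (a : Int) : a <<< (0 : Nat) = a := by
  rw [int_shiftL_eq]; ring

theorem int_shiftL_one (a : Int) : a <<< (1 : Nat) = 2 * a := by
  rw [int_shiftL_eq]; ring

theorem int_shiftL_succ (a : Int) (k : Nat) :
    (a <<< k) <<< (1 : Nat) = a <<< (k + 1) := by
  rw [int_shiftL_eq, int_shiftL_eq, int_shiftL_eq]; ring

theorem nat_ldiff_add_and (n m : Nat) : n.ldiff m + (n &&& m) = n := by
  induction n using Nat.binaryRec generalizing m with
  | zero =>
      have h1 : Nat.ldiff 0 m = 0 := Nat.eq_of_testBit_eq (fun i => by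
        simp [Nat.testBit_ldiff, Nat.zero_testBit])
      simp [h1]
  | bit b n ih =>
      rw [← Nat.bit_testBit_zero_shiftRight_one m, Nat.ldiff_bit, Nat.land_bit,
        Nat.bit_val, Nat.bit_val, Nat.bit_val]
      have := ih (m >>> 1)
      cases b <;> cases m.testBit 0 <;> simp <;> omega

theorem nat_ldiff_eq_sub (n m : Nat) : n.ldiff m = n - (n &&& m) := by
  have := nat_ldiff_add_and n m
  omega

theorem testBit_bor (a b : Int) (k : Nat) :
    (PySem.Int.bor a b).testBit k = (a.testBit k || b.testBit k) := by
  have key : ∀ (x : Nat) (y : Nat),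
      (PySem.Int.bor (Int.ofNat x) (Int.negSucc y)).testBit k
        = ((Int.ofNat x).testBit k || (Int.negSucc y).testBit k) := by
    intro x y
    have hx : (0 : Int) ≤ Int.ofNat x := Int.natCast_nonneg x
    have hy : ¬ (0 : Int) ≤ Int.negSucc y := not_le.mpr (Int.negSucc_lt_zero y)
    have hyv : (-(Int.negSucc y) - 1).toNat = y := by
      rw [Int.negSucc_eq]; omega
    have hxv : (Int.ofNat x).toNat = x := rfl
    rw [PySem.Int.bor]
    simp only [hx, hy, if_true, if_false, hyv, hxv]
    have : (-(↑(y - (y &&& x)) : Int) - 1) = Int.negSucc (y - (y &&& x)) := by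
      rw [Int.negSucc_eq]; ring
    rw [this, ← nat_ldiff_eq_sub]
    show (!(y.ldiff x).testBit k) = _
    rw [Nat.testBit_ldiff]
    show _ = (x.testBit k || !y.testBit k)
    cases x.testBit k <;> cases y.testBit k <;> rfl
  cases a with
  | ofNat m =>
      cases b with
      | ofNat nn =>
          have h1 : (0 : Int) ≤ Int.ofNat m := Int.natCast_nonneg m
          have h2 : (0 : Int) ≤ Int.ofNat nn := Int.natCast_nonneg nn
          rw [PySem.Int.bor]
          simp only [h1, h2, if_true]
          show (Nat.testBit _ k) = _
          rw [Nat.testBit_lor]; rfl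
      | negSucc nn => exact key m nn
  | negSucc m =>
      cases b with
      | ofNat nn =>
          rw [PySem.Int.bor_comm]
          rw [key nn m]
          cases (Int.ofNat nn).testBit k <;> cases (Int.negSucc m).testBit k <;> rfl
      | negSucc nn =>
          have h1 : ¬ (0 : Int) ≤ Int.negSucc m := not_le.mpr (Int.negSucc_lt_zero m)
          have h2 : ¬ (0 : Int) ≤ Int.negSucc nn := not_le.mpr (Int.negSucc_lt_zero nn)
          have hm : (-(Int.negSucc m) - 1).toNat = m := by rw [Int.negSucc_eq]; omega
          have hn : (-(Int.negSucc nn) - 1).toNat = nn := by rw [Int.negSucc_eq]; omega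
          rw [PySem.Int.bor]
          simp only [h1, h2, if_false, hm, hn]
          have : (-(↑(m &&& nn) : Int) - 1) = Int.negSucc (m &&& nn) := by
            rw [Int.negSucc_eq]; ring
          rw [this]
          show (!(m &&& nn).testBit k) = (!m.testBit k || !nn.testBit k)
          rw [Nat.testBit_and]
          cases m.testBit k <;> cases nn.testBit k <;> rfl

theorem int_ext_testBit {a b : Int} (h : ∀ k, a.testBit k = b.testBit k) : a = b := by
  cases a with
  | ofNat m =>
      cases b with
      | ofNat nn =>
          have : m = nn := Nat.eq_of_testBit_eq (fun i => h i)
          simp [this]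
      | negSucc nn =>
          exfalso
          have hk := h (m + nn + 1)
          have hm : m.testBit (m + nn + 1) = false :=
            Nat.testBit_lt_two_pow (lt_of_lt_of_le Nat.lt_two_pow_self
              (Nat.pow_le_pow_right (by omega) (by omega)))
          have hn : nn.testBit (m + nn + 1) = false :=
            Nat.testBit_lt_two_pow (lt_of_lt_of_le Nat.lt_two_pow_self
              (Nat.pow_le_pow_right (by omega) (by omega)))
          rw [show (Int.ofNat m).testBit (m + nn + 1) = m.testBit (m + nn + 1) from rfl,
              show (Int.negSucc nn).testBit (m + nn + 1) = !nn.testBit (m + nn + 1) from rfl,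
              hm, hn] at hk
          exact Bool.false_ne_true hk
  | negSucc m =>
      cases b with
      | ofNat nn =>
          exfalso
          have hk := h (m + nn + 1)
          have hm : m.testBit (m + nn + 1) = false :=
            Nat.testBit_lt_two_pow (lt_of_lt_of_le Nat.lt_two_pow_self
              (Nat.pow_le_pow_right (by omega) (by omega)))
          have hn : nn.testBit (m + nn + 1) = false :=
            Nat.testBit_lt_two_pow (lt_of_lt_of_le Nat.lt_two_pow_self
              (Nat.pow_le_pow_right (by omega) (by omega)))
          rw [show (Int.negSucc m).testBit (m + nn + 1) = !m.testBit (m + nn + 1) from rfl,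
              show (Int.ofNat nn).testBit (m + nn + 1) = nn.testBit (m + nn + 1) from rfl,
              hm, hn] at hk
          exact Bool.false_ne_true hk.symm
      | negSucc nn =>
          have : m = nn := Nat.eq_of_testBit_eq (fun i => by
            have := h i
            rw [show (Int.negSucc m).testBit i = !m.testBit i from rfl,
                show (Int.negSucc nn).testBit i = !nn.testBit i from rfl] at this
            cases hmi : m.testBit i <;> cases hni : nn.testBit i <;>
              simp [hmi, hni] at this ⊢)
          simp [this]

theorem testBit_two_mul_zero (a : Int) : (2 * a).testBit 0 = false := by
  have : (2 * a) = Int.bit false a := by rw [Int.bit_val]; simp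
  rw [this, Int.testBit_bit_zero]

theorem testBit_two_mul_succ (a : Int) (k : Nat) :
    (2 * a).testBit (k + 1) = a.testBit k := by
  have : (2 * a) = Int.bit false a := by rw [Int.bit_val]; simp
  rw [this, Int.testBit_bit_succ]

theorem bor_assoc (a b c : Int) :
    PySem.Int.bor (PySem.Int.bor a b) c = PySem.Int.bor a (PySem.Int.bor b c) := by
  apply int_ext_testBit
  intro k
  simp only [testBit_bor, Bool.or_assoc]

theorem bor_shiftL_one (a b : Int) :
    (PySem.Int.bor a b) <<< (1 : Nat) = PySem.Int.bor (a <<< (1 : Nat)) (b <<< (1 : Nat)) := by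
  rw [int_shiftL_one, int_shiftL_one, int_shiftL_one]
  apply int_ext_testBit
  intro k
  cases k with
  | zero => simp [testBit_bor, testBit_two_mul_zero]
  | succ k => simp [testBit_bor, testBit_two_mul_succ]

theorem zero_bor (a : Int) : PySem.Int.bor 0 a = a := by
  rw [PySem.Int.bor_comm, PySem.Int.bor_zero]

-- ---- the packed cyclic window of length L starting at index i ----

def winF (seq : List Int) (i : Nat) : Nat → Int
  | 0 => 0
  | L + 1 => PySem.Int.bor (seq.getD (i % seq.length) 0) (winF seq (i + 1) L <<< (1 : Nat))

theorem winF_congr_mod (seq : List Int) (L : Nat) :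
    ∀ i i' : Nat, i % seq.length = i' % seq.length → winF seq i L = winF seq i' L := by
  induction L with
  | zero => intro i i' _; rfl
  | succ L ih =>
      intro i i' h
      show PySem.Int.bor _ _ = PySem.Int.bor _ _
      rw [h, ih (i + 1) (i' + 1) (by rw [Nat.add_mod i, Nat.add_mod i', h])]

theorem winF_add (seq : List Int) (L1 L2 : Nat) :
    ∀ i : Nat, winF seq i (L1 + L2)
      = PySem.Int.bor (winF seq i L1) (winF seq (i + L1) L2 <<< L1) := by
  induction L1 with
  | zero =>
      intro i
      rw [Nat.zero_add]
      show winF seq i L2 = PySem.Int.bor 0 (winF seq (i + 0) L2 <<< (0 : Nat))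
      rw [int_shiftL_zero, zero_bor]
      rfl
  | succ L1 ih =>
      intro i
      have e : L1 + 1 + L2 = (L1 + L2) + 1 := by omega
      rw [e]
      show PySem.Int.bor (seq.getD (i % seq.length) 0) (winF seq (i + 1) (L1 + L2) <<< (1 : Nat)) = _
      rw [ih (i + 1), bor_shiftL_one, int_shiftL_succ, ← bor_assoc]
      have e2 : i + 1 + L1 = i + (L1 + 1) := by omega
      rw [e2]
      rfl

theorem winF_one (seq : List Int) (i : Nat) :
    winF seq i 1 = seq.getD (i % seq.length) 0 := by
  show PySem.Int.bor _ ((0 : Int) <<< (1 : Nat)) = _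
  rw [show ((0 : Int) <<< (1 : Nat)) = 0 from by rw [int_shiftL_one]; ring,
      PySem.Int.bor_zero]

theorem winF_snoc (seq : List Int) (i L : Nat) :
    winF seq i (L + 1)
      = PySem.Int.bor (winF seq i L) (seq.getD ((i + L) % seq.length) 0 <<< L) := by
  rw [winF_add seq L 1 i, winF_one]

-- ---- A's inner fold packs the window ----

theorem innerA_eq_winF (seq : List Int) (i : Nat) (L : Nat) :
    (PySem.List.pyRange 0 ((L : Nat) : Int)).foldl
        (fun w j =>
          PySem.Int.bor w
            ((PySem.List.pyGetD seq (PySem.Int.mod ((i : Int) + j) (seq.length : Int)) 0) <<< j.toNat))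
        0
      = winF seq i L := by
  induction L with
  | zero => rw [show (((0 : Nat) : Int)) = 0 from rfl, PySem.List.pyRange_one_eq_nil le_rfl]; rfl
  | succ L ih =>
      rw [show (((L + 1 : Nat) : Int)) = ((L : Nat) : Int) + 1 from by push_cast; ring,
          PySem.List.pyRange_one_succ_right (by positivity), List.foldl_append]
      simp only [List.foldl_cons, List.foldl_nil]
      rw [ih, winF_snoc]
      rw [show ((i : Int) + (L : Int)) = (((i + L : Nat) : Nat) : Int) from by push_cast; ring,
          PySem.Int.mod_natCast, PySem.List.pyGetD_natCast, Int.toNat_natCast]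

-- ---- the combine/double pass over the whole table ----

theorem combine_map (seq : List Int) (hlen : 0 < seq.length) (Lp offN : Nat) :
    (PySem.List.pyRange 0 (seq.length : Int)).map (fun i =>
        PySem.Int.bor
          (PySem.List.pyGetD ((List.range seq.length).map (fun k => winF seq k offN)) i 0)
          ((PySem.List.pyGetD ((List.range seq.length).map (fun k => winF seq k Lp))
              (PySem.Int.mod (i + ((offN : Nat) : Int)) (seq.length : Int)) 0) <<< (((offN : Nat) : Int)).toNat))
      = (List.range seq.length).map (fun k => winF seq k (offN + Lp)) := by
  apply List.ext_getElem
  · simp [PySem.List.length_pyRange_one]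
  · intro k hk1 hk2
    have hkr : k < (PySem.List.pyRange 0 (seq.length : Int)).length := by
      simpa using hk1
    have hklen : k < seq.length := by
      simpa [PySem.List.length_pyRange_one] using hkr
    rw [List.getElem_map, PySem.List.getElem_pyRange_one 0 (seq.length : Int) k hkr,
        zero_add]
    rw [List.getElem_map, List.getElem_range]
    rw [PySem.List.pyGetD_natCast, PySem.List.getD_map_range _ _ _ _ hklen]
    rw [show ((k : Int) + ((offN : Nat) : Int)) = (((k + offN : Nat) : Nat) : Int) from by push_cast; ring,
        PySem.Int.mod_natCast, PySem.List.pyGetD_natCast,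
        PySem.List.getD_map_range _ _ _ _ (Nat.mod_lt _ hlen)]
    have hmm : (k + offN) % seq.length % seq.length = (k + offN) % seq.length := by simp
    rw [winF_congr_mod seq Lp ((k + offN) % seq.length) (k + offN) hmm]
    rw [Int.toNat_natCast]
    exact (winF_add seq offN Lp k).symm

theorem arith_odd (m Lp offN : Nat) (h : m % 2 = 1) :
    offN + Lp + m / 2 * (Lp + Lp) = offN + m * Lp := by
  obtain ⟨q, hq⟩ : ∃ q, m / 2 = q := ⟨_, rfl⟩
  have hm : m = 2 * q + 1 := by omega
  rw [hq, hm]; ring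

theorem arith_even (m Lp offN : Nat) (h : m % 2 = 0) :
    offN + m / 2 * (Lp + Lp) = offN + m * Lp := by
  obtain ⟨q, hq⟩ : ∃ q, m / 2 = q := ⟨_, rfl⟩
  have hm : m = 2 * q := by omega
  rw [hq, hm]; ring

theorem pvBLoop_spec (seq : List Int) (hlen : 0 < seq.length) :
    ∀ m : Nat, 1 ≤ m → ∀ Lp offN : Nat, 1 ≤ Lp →
      pvBLoop (seq.length : Int) m
          ((List.range seq.length).map (fun k => winF seq k Lp)) ((Lp : Nat) : Int)
          ((List.range seq.length).map (fun k => winF seq k offN)) ((offN : Nat) : Int)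
        = (List.range seq.length).map (fun k => winF seq k (offN + m * Lp)) := by
  intro m
  induction m using Nat.strong_induction_on with
  | _ m ih =>
      intro hm Lp offN hLp
      rw [pvBLoop]
      by_cases hodd : m % 2 = 1
      · rw [if_pos hodd, if_pos hodd]
        rw [combine_map seq hlen Lp offN]
        by_cases hhalf : m / 2 = 0
        · rw [if_pos hhalf]
          have hm1 : m = 1 := by omega
          subst hm1
          congr 1; funext k; congr 1; omega
        · rw [if_neg hhalf]
          rw [combine_map seq hlen Lp Lp]
          rw [show (((Lp : Nat) : Int) * 2) = (((Lp + Lp : Nat) : Nat) : Int) from by push_cast; ring,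
              show (((offN : Nat) : Int) + ((Lp : Nat) : Int)) = (((offN + Lp : Nat) : Nat) : Int) from by push_cast; ring]
          rw [ih (m / 2) (by omega) (by omega) (Lp + Lp) (offN + Lp) (by omega)]
          congr 1; funext k; congr 1
          exact arith_odd m Lp offN hodd
      · rw [if_neg hodd, if_neg hodd]
        have hhalf : ¬ m / 2 = 0 := by omega
        rw [if_neg hhalf]
        rw [combine_map seq hlen Lp Lp]
        rw [show (((Lp : Nat) : Int) * 2) = (((Lp + Lp : Nat) : Nat) : Int) from by push_cast; ring]
        rw [ih (m / 2) (by omega) (by omega) (Lp + Lp) offN (by omega)]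
        congr 1; funext k; congr 1
        exact arith_even m Lp offN (by omega)

-- ---- assembling both sides ----

theorem A_eq_map (seq : List Int) (n : Int) :
    debruijn_to_hexagram_permutation seq n
      = (List.range seq.length).map (fun k => winF seq k n.toNat) := by
  show ((PySem.List.pyRange 0 (seq.length : Int)).foldl _ []) = _
  rw [PySem.List.foldl_append_singleton_eq_map, List.nil_append]
  apply List.ext_getElem
  · simp [PySem.List.length_pyRange_one]
  · intro k hk1 hk2
    have hkr : k < (PySem.List.pyRange 0 (seq.length : Int)).length := by
      simpa using hk1
    rw [List.getElem_map, PySem.List.getElem_pyRange_one 0 (seq.length : Int) k hkr, zero_add,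
        List.getElem_map, List.getElem_range]
    by_cases hn : 0 < n
    · rw [show n = ((n.toNat : Nat) : Int) from (Int.toNat_of_nonneg hn.le).symm]
      exact innerA_eq_winF seq k n.toNat
    · rw [PySem.List.pyRange_one_eq_nil (by omega)]
      have : n.toNat = 0 := by omega
      rw [this]
      rfl

theorem init_out (seq : List Int) :
    List.replicate seq.length (0 : Int) = (List.range seq.length).map (fun k => winF seq k 0) := by
  rw [show (fun k => winF seq k 0) = (fun _ : Nat => (0 : Int)) from rfl,
      List.map_const', List.length_range]

theorem init_P (seq : List Int) :
    seq = (List.range seq.length).map (fun k => winF seq k 1) := by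
  apply List.ext_getElem
  · simp
  · intro k hk1 hk2
    rw [List.getElem_map, List.getElem_range, winF_one, Nat.mod_eq_of_lt hk1,
        List.getD_eq_getElem seq 0 hk1]

theorem main_equiv (seq : List Int) (n : Int) :
    debruijn_to_hexagram_permutation seq n = debruijn_to_hexagram_permutation_alt seq n := by
  rw [debruijn_to_hexagram_permutation_alt]
  by_cases hz : (seq.length : Int) = 0 ∨ n ≤ 0
  · rw [if_pos hz, A_eq_map]
    have hn0 : n.toNat = 0 ∨ seq.length = 0 := by
      rcases hz with h | h
      · right; exact_mod_cast h
      · left; omega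
    rcases hn0 with h | h
    · rw [h, show (fun k => winF seq k 0) = (fun _ : Nat => (0 : Int)) from rfl,
          List.map_const', List.length_range]
    · rw [h]; rfl
  · rw [if_neg hz]
    push Not at hz
    obtain ⟨hN0, hn0⟩ := hz
    have hlen : 0 < seq.length := by
      rcases Nat.eq_zero_or_pos seq.length with h | h
      · exact absurd (by rw [h]; rfl) hN0
      · exact h
    rw [A_eq_map]
    calc (List.range seq.length).map (fun k => winF seq k n.toNat)
        = (List.range seq.length).map (fun k => winF seq k (0 + n.toNat * 1)) := by
          congr 1; funext k; congr 1; omega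
      _ = pvBLoop (seq.length : Int) n.toNat
            ((List.range seq.length).map (fun k => winF seq k 1)) ((1 : Nat) : Int)
            ((List.range seq.length).map (fun k => winF seq k 0)) ((0 : Nat) : Int) :=
          (pvBLoop_spec seq hlen n.toNat (by omega) 1 0 le_rfl).symm
      _ = pvBLoop (seq.length : Int) n.toNat seq 1 (List.replicate seq.length 0) 0 := by
          rw [← init_P, ← init_out]; rfl

-- ===== VERDICT (by name: the statement is the Claim_ definition above) =====
theorem debruijn_to_hexagram_permutation_spec : Claim_equal_debruijn_to_hexagram_permutation := by
  intro binary_seq n _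
  show _ = _
  exact main_equiv binary_seq n
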